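-- pv_equiv track=rewrite | github.com/jamestjw/aoc | lib/graph/clique.py | bron_kerbosch_with_pivot
-- ===== SOURCE A (Python) =====
-- def bron_kerbosch_with_pivot(r, p, x, adjacency, acc=[]):
--     """
--     r -- potential clique
--     p -- remaining vertices
--     x -- skipped vertices
--     """
--     if len(p) == 0 and len(x) == 0:
--         return acc + [r]
--
--     # Choose the node with the most neighbors to be the pivot,
--     # this minimises the number of branches below
--     pivot = sorted(p | x, key=lambda x: len(adjacency[x]))[-1]
--     for v in list(p - set(adjacency[pivot])):
--         acc = bron_kerbosch_with_pivot(
--             r | {v}, p & adjacency[v], x & adjacency[v], adjacency, acc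
--         )
--         p -= {v}
--         x |= {v}
--     return acc
-- ===== SOURCE B (Python) =====
-- def _branches(cands, r, p, x, adjacency):
--     # pure recursion over the candidate list: subtree results are returned and
--     # concatenated instead of threading an accumulator through mutated p/x
--     if not cands:
--         return []
--     v, rest = cands[0], cands[1:]
--     return (_solve(r | {v}, p & adjacency[v], x & adjacency[v], adjacency)
--             + _branches(rest, r, p - {v}, x | {v}, adjacency))
--
--
-- def _solve(r, p, x, adjacency):
--     if len(p) == 0 and len(x) == 0:
--         return [r]
--     pivot = sorted(p | x, key=lambda v: len(adjacency[v]))[-1]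
--     return _branches(list(p - set(adjacency[pivot])), r, p, x, adjacency)
--
--
-- def bron_kerbosch_with_pivot(r, p, x, adjacency, acc=[]):
--     return acc + _solve(r, p, x, adjacency)
-- ===== Notes on version B (the rewrite author's own statement) =====
-- stated objective: alternative
-- what changed: A threads a result accumulator through the recursive calls of one imperative function and mutates p/x in place inside its for-loop; B is a pair of pure functions - a direct-return solver whose base case returns [r] and a recursion over the candidate list that concatenates the subtree results - with the accumulator only prepended once at the top level.
import Mathlib
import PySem

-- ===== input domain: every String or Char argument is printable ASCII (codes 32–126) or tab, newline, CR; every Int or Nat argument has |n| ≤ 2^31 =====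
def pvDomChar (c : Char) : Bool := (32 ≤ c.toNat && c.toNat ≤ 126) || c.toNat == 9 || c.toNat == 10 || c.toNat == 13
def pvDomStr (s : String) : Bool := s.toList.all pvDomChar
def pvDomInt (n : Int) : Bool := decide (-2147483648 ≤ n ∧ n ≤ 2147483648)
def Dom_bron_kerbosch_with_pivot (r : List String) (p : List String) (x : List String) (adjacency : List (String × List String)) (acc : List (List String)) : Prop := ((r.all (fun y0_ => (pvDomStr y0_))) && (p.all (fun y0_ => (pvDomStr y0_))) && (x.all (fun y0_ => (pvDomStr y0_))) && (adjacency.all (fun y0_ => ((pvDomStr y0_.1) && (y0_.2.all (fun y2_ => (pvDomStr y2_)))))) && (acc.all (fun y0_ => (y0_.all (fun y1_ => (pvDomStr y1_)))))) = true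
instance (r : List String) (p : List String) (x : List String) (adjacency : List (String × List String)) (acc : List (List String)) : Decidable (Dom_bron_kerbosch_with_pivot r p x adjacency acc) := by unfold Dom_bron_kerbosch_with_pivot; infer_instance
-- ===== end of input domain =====

-- B replaces A's accumulator threaded through recursive calls and in-place p/x mutation by a pure
-- direct-return recursion over the candidate list whose subtree results are concatenated (objective:
-- alternative decomposition, same asymptotic cost).  Python A mutates its p and x set arguments in
-- place (p -= {v}, x |= {v}); B does not: the equivalence proved here is about the RETURN value only.
-- Python sets are modelled as PySem.Set (insertion-order element lists), one fixed realization of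
-- Python's unspecified set iteration order; both ports use the same realization.

-- ===== PORT A =====
-- the dict[str, set[str]] argument, as Python receives it (values are sets)
def pvAdjDict (adjacency : List (String × List String)) : PySem.Dict String (PySem.Set String) :=
  PySem.Dict.ofList (adjacency.map (fun kv => (kv.1, PySem.Set.ofList kv.2)))

-- A's recursive body; fuel only makes the recursion total.  Whenever the Python call returns,
-- every chain of nested calls strictly shrinks p, or adds a fresh member of p to r, or (p and r
-- unchanged) strictly shrinks x — an identical nested state would recurse forever — so its depth
-- is below the (2|p|+1)(|p|+|x|+1)+1 fuel the top level supplies and the port computes its value;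
-- where the Python recurses forever, both ports cut off identically (the theorem holds for any fuel).
def pvBkA (d : PySem.Dict String (PySem.Set String)) :
    Nat → PySem.Set String → PySem.Set String → PySem.Set String →
    List (List String) → List (List String)
  | 0, _, _, _, acc => acc
  | Nat.succ fuel, r, p, x, acc =>
    if PySem.Set.len p == 0 && PySem.Set.len x == 0 then acc ++ [r]
    else
      -- pivot = sorted(p | x, key=lambda x: len(adjacency[x]))[-1]  ([-1] of a list the branch guarantees nonempty)
      let pivot := PySem.List.pyGetD
        (PySem.List.sorted (PySem.Set.union p x) (fun v => PySem.Set.len (PySem.Dict.getD d v PySem.Set.empty))) (-1) ""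
      -- for v in list(p - set(adjacency[pivot])): acc = rec(r|{v}, p&adj[v], x&adj[v], acc); p -= {v}; x |= {v}
      let st := (PySem.Set.diff p (PySem.Dict.getD d pivot PySem.Set.empty)).foldl
        (fun (st : PySem.Set String × PySem.Set String × List (List String)) v =>
          (PySem.Set.discard st.1 v, PySem.Set.add st.2.1 v,
           pvBkA d fuel (PySem.Set.add r v)
             (PySem.Set.inter st.1 (PySem.Dict.getD d v PySem.Set.empty))
             (PySem.Set.inter st.2.1 (PySem.Dict.getD d v PySem.Set.empty)) st.2.2))
        (p, x, acc)
      st.2.2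

def bron_kerbosch_with_pivot (r : List String) (p : List String) (x : List String) (adjacency : List (String × List String)) (acc : List (List String)) : List (List String) :=
  pvBkA (pvAdjDict adjacency)
    ((2 * (PySem.Set.ofList p).length + 1) * ((PySem.Set.ofList p).length + (PySem.Set.ofList x).length + 1) + 1)
    (PySem.Set.ofList r) (PySem.Set.ofList p) (PySem.Set.ofList x) acc

-- ===== PORT B =====
-- _branches(cands, r, p, x, adjacency): pure recursion over the candidate list (Source B); the
-- recursive-call argument `solve` is B's _solve at the current depth
def pvBkBbranches (d : PySem.Dict String (PySem.Set String))
    (solve : PySem.Set String → PySem.Set String → PySem.Set String → List (List String))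
    (r : PySem.Set String) :
    List String → PySem.Set String → PySem.Set String → List (List String)
  | [], _, _ => []
  | v :: rest, p, x =>
    solve (PySem.Set.add r v)
        (PySem.Set.inter p (PySem.Dict.getD d v PySem.Set.empty))
        (PySem.Set.inter x (PySem.Dict.getD d v PySem.Set.empty)) ++
      pvBkBbranches d solve r rest (PySem.Set.discard p v) (PySem.Set.add x v)

-- _solve(r, p, x, adjacency) (same fuel discipline as A's port: totality only)
def pvBkB (d : PySem.Dict String (PySem.Set String)) :
    Nat → PySem.Set String → PySem.Set String → PySem.Set String → List (List String)
  | 0, _, _, _ => []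
  | Nat.succ fuel, r, p, x =>
    if PySem.Set.len p == 0 && PySem.Set.len x == 0 then [r]
    else
      let pivot := PySem.List.pyGetD
        (PySem.List.sorted (PySem.Set.union p x) (fun v => PySem.Set.len (PySem.Dict.getD d v PySem.Set.empty))) (-1) ""
      pvBkBbranches d (pvBkB d fuel) r
        (PySem.Set.diff p (PySem.Dict.getD d pivot PySem.Set.empty)) p x

def bron_kerbosch_with_pivot_alt (r : List String) (p : List String) (x : List String) (adjacency : List (String × List String)) (acc : List (List String)) : List (List String) :=
  acc ++ pvBkB (pvAdjDict adjacency)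
    ((2 * (PySem.Set.ofList p).length + 1) * ((PySem.Set.ofList p).length + (PySem.Set.ofList x).length + 1) + 1)
    (PySem.Set.ofList r) (PySem.Set.ofList p) (PySem.Set.ofList x)

-- ===== PRECONDITION & SPEC =====
-- Pre_ excludes only the inputs on which A raises KeyError: p or x nonempty while some vertex of
-- p|x is not a key of the adjacency dict (the pivot sort looks every element of p|x up at once).
def Pre_bron_kerbosch_with_pivot (r : List String) (p : List String) (x : List String) (adjacency : List (String × List String)) (acc : List (List String)) : Prop :=
  (p = [] ∧ x = []) ∨
  (∀ v ∈ p ++ x,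
    (PySem.Dict.ofList (adjacency.map (fun kv => (kv.1, PySem.Set.ofList kv.2)))).contains v = true)
instance (r : List String) (p : List String) (x : List String) (adjacency : List (String × List String)) (acc : List (List String)) : Decidable (Pre_bron_kerbosch_with_pivot r p x adjacency acc) := by unfold Pre_bron_kerbosch_with_pivot; infer_instance

def pvWitness_bron_kerbosch_with_pivot : List String × List String × List String × (List (String × List String)) × List (List String) :=
  (["a"], ["b", "c"], [], [("b", ["c"]), ("c", ["b"])], [["q"]])

def Spec_bron_kerbosch_with_pivot (r : List String) (p : List String) (x : List String) (adjacency : List (String × List String)) (acc : List (List String)) (out : List (List String)) : Prop := out = bron_kerbosch_with_pivot_alt r p x adjacency acc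
instance (r : List String) (p : List String) (x : List String) (adjacency : List (String × List String)) (acc : List (List String)) (out : List (List String)) : Decidable (Spec_bron_kerbosch_with_pivot r p x adjacency acc out) := by unfold Spec_bron_kerbosch_with_pivot; infer_instance

-- ===== CLAIM (what is proved, stated in full; the proofs are below) =====
def Claim_equal_bron_kerbosch_with_pivot : Prop := ∀ (r : List String) (p : List String) (x : List String) (adjacency : List (String × List String)) (acc : List (List String)), Dom_bron_kerbosch_with_pivot r p x adjacency acc → Pre_bron_kerbosch_with_pivot r p x adjacency acc → Spec_bron_kerbosch_with_pivot r p x adjacency acc (bron_kerbosch_with_pivot r p x adjacency acc)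

-- ===== LEMMAS AND PROOFS =====

-- A's accumulator-threading recursion equals acc ++ B's direct-return recursion, for every fuel.
theorem pvBkA_eq_acc_append_pvBkB (fuel : Nat) (d : PySem.Dict String (PySem.Set String))
    (r p x : PySem.Set String) (acc : List (List String)) :
    pvBkA d fuel r p x acc = acc ++ pvBkB d fuel r p x := by
  induction fuel generalizing r p x acc with
  | zero => simp [pvBkA, pvBkB]
  | succ n ih =>
    rw [pvBkA, pvBkB]
    by_cases hbase : (PySem.Set.len p == 0 && PySem.Set.len x == 0) = true
    · rw [if_pos hbase, if_pos hbase]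
    · rw [if_neg hbase, if_neg hbase]
      -- the two branches compute the same pivot and candidate list; induct on the candidates
      have loop : ∀ (cs : List String) (p' x' : PySem.Set String) (acc' : List (List String)),
          (cs.foldl
            (fun (st : PySem.Set String × PySem.Set String × List (List String)) v =>
              (PySem.Set.discard st.1 v, PySem.Set.add st.2.1 v,
               pvBkA d n (PySem.Set.add r v)
                 (PySem.Set.inter st.1 (PySem.Dict.getD d v PySem.Set.empty))
                 (PySem.Set.inter st.2.1 (PySem.Dict.getD d v PySem.Set.empty)) st.2.2))
            (p', x', acc')).2.2
          = acc' ++ pvBkBbranches d (pvBkB d n) r cs p' x' := by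
        intro cs
        induction cs with
        | nil => intro p' x' acc'; simp [pvBkBbranches]
        | cons v rest ihc =>
          intro p' x' acc'
          rw [List.foldl_cons, pvBkBbranches, ihc, ih, List.append_assoc]
      exact loop _ p x acc

-- ===== VERDICT (by name: the statement is the Claim_ definition above) =====
theorem bron_kerbosch_with_pivot_spec : Claim_equal_bron_kerbosch_with_pivot := by
  intro r p x adjacency acc _ _
  unfold Spec_bron_kerbosch_with_pivot bron_kerbosch_with_pivot bron_kerbosch_with_pivot_alt
  exact pvBkA_eq_acc_append_pvBkB _ _ _ _ _ _
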